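-- pv_equiv track=rewrite | github.com/KorsakovaSveta/medicine_guide | medicine_guide/website/views.py | grouped_terms
-- ===== SOURCE A (Python) =====
-- def grouped_terms(all_nodes):
--     grouped_terms = {}
--     for node in all_nodes:
--         first_letter = node[0].upper()
--         if first_letter not in grouped_terms:
--             grouped_terms[first_letter] = []
--         grouped_terms[first_letter].append(node)
--     return grouped_terms
-- ===== SOURCE B (Python) =====
-- def grouped_terms(all_nodes):
--     letters = list(dict.fromkeys(n[0].upper() for n in all_nodes))
--     return {L: [n for n in all_nodes if n[0].upper() == L] for L in letters}
-- ===== Notes on version B (the rewrite author's own statement) =====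
-- stated objective: alternative
-- what changed: A builds the dict incrementally, appending each node to its letter's bucket in one pass; B first collects the distinct uppercased first letters in order of first occurrence (dict.fromkeys) and then builds each group with one filter of the input per letter.
import Mathlib
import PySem

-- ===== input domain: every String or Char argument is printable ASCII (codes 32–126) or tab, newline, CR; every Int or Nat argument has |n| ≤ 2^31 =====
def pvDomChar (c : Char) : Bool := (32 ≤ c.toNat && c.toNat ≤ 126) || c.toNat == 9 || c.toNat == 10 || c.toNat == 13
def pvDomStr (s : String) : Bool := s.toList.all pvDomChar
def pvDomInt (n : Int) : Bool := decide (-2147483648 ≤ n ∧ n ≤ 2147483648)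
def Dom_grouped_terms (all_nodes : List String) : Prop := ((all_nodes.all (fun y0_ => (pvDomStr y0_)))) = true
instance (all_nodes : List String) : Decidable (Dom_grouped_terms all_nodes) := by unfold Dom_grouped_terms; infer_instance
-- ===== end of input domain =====

-- B replaces A's incremental dict-building loop by a two-pass scheme (ordered dedup of the
-- uppercased first letters, then one filter of the input per letter); objective: alternative.


-- ===== PORT A =====
-- node[0].upper() (both Pythons compute this same expression); "" stands for the
-- IndexError case node = "", which Pre_ excludes.
def gtKey (node : String) : String :=
  match PySem.Str.pyGet? node 0 with
  | some c => PySem.Str.upper (String.ofList [c])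
  | none => ""

def grouped_terms (all_nodes : List String) : List (String × List String) :=
  (all_nodes.foldl
    (fun d node =>
      let first_letter := gtKey node
      let d' := if d.contains first_letter then d else d.insert first_letter ([] : List String)
      d'.modify first_letter [] (fun v => v ++ [node]))
    PySem.Dict.empty).items

-- ===== PORT B =====
def grouped_terms_alt (all_nodes : List String) : List (String × List String) :=
  (PySem.List.dedup (all_nodes.map gtKey)).map
    (fun L => (L, all_nodes.filter (fun n => gtKey n == L)))

-- ===== PRECONDITION & SPEC =====
-- Pre_ excludes only lists containing an empty string, on which A raises IndexError (node[0]).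
def Pre_grouped_terms (all_nodes : List String) : Prop := ∀ s ∈ all_nodes, s ≠ ""
instance (all_nodes : List String) : Decidable (Pre_grouped_terms all_nodes) := by unfold Pre_grouped_terms; infer_instance
def pvWitness_grouped_terms : List String := ["apple", "Avocado", "banana", "cherry", "berry"]

def Spec_grouped_terms (all_nodes : List String) (out : List (String × List String)) : Prop := out = grouped_terms_alt all_nodes
instance (all_nodes : List String) (out : List (String × List String)) : Decidable (Spec_grouped_terms all_nodes out) := by unfold Spec_grouped_terms; infer_instance

-- ===== CLAIM (what is proved, stated in full; the proofs are below) =====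
def Claim_equal_grouped_terms : Prop := ∀ (all_nodes : List String), Dom_grouped_terms all_nodes → Pre_grouped_terms all_nodes → Spec_grouped_terms all_nodes (grouped_terms all_nodes)

-- ===== LEMMAS AND PROOFS =====

-- A's "if key missing: d[key] = []" followed by the append is one dict-modify.
theorem insert_nil_modify (d : PySem.Dict String (List String)) (k : String)
    (f : List String → List String) (h : d.contains k = false) :
    (d.insert k ([] : List String)).modify k [] f = d.modify k [] f := by
  have hnk : ∀ p ∈ d.items, (p.1 == k) = false := by
    intro p hp
    by_contra hc
    simp only [Bool.not_eq_false, beq_iff_eq] at hc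
    have hm : k ∈ d.keys := hc ▸ PySem.Dict.mem_keys_of_mem_items d hp
    rw [← PySem.Dict.contains_iff_mem_keys] at hm
    simp [hm] at h
  have hg : d.getD k ([] : List String) = [] := PySem.Dict.getD_of_not_contains d [] h
  simp only [PySem.Dict.modify, PySem.Dict.getD_insert_self, hg]
  apply PySem.Dict.ext
  rw [PySem.Dict.items_insert_of_contains, PySem.Dict.items_insert_of_not_contains,
      PySem.Dict.items_insert_of_not_contains]
  · have hid : ∀ p ∈ d.items, (if (p.1 == k) = true then (k, f []) else p) = p := by
      intro p hp
      simp [hnk p hp]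
    simp only [List.map_append]
    rw [List.map_congr_left hid]
    simp
  · exact h
  · exact h
  · exact PySem.Dict.contains_insert_self _ _ _

-- a dict with distinct keys is its key list paired with its lookups
theorem items_eq_map_keys {κ ν : Type} [BEq κ] [LawfulBEq κ] (d : PySem.Dict κ ν)
    (h : d.keys.Nodup) (d0 : ν) :
    d.items = d.keys.map (fun k => (k, d.getD k d0)) := by
  have hk : d.keys.map (fun k => (k, d.getD k d0)) = d.items.map (fun p => (p.1, d.getD p.1 d0)) := by
    simp only [PySem.Dict.keys, List.map_map]
    rfl
  rw [hk]
  have hid : ∀ p ∈ d.items, ((p.1 : κ), d.getD p.1 d0) = p := by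
    intro p hp
    have : d.getD p.1 d0 = p.2 := PySem.Dict.getD_of_mem_items d (by exact hp) h d0
    simp [this]
  exact ((List.map_congr_left hid).trans (List.map_id' d.items)).symm

theorem grouped_terms_eq_items (all_nodes : List String) :
    grouped_terms all_nodes =
      ((all_nodes.map (fun n => (gtKey n, n))).foldl
        (fun d p => d.modify p.1 [] (fun v => v ++ [p.2])) PySem.Dict.empty).items := by
  unfold grouped_terms
  rw [List.foldl_map]
  congr 1
  apply PySem.List.foldl_congr_mem
  intro d node _
  by_cases h : d.contains (gtKey node) = true
  · simp only [h, if_true]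
  · simp only [h, if_false, Bool.false_eq_true]
    exact insert_nil_modify d (gtKey node) _ (by simpa using h)

-- ===== VERDICT (by name: the statement is the Claim_ definition above) =====
theorem grouped_terms_spec : Claim_equal_grouped_terms := by
  intro all_nodes _dom _pre
  unfold Spec_grouped_terms grouped_terms_alt
  rw [grouped_terms_eq_items]
  set l := all_nodes.map (fun n => (gtKey n, n)) with hl
  set D := l.foldl (fun d p => d.modify p.1 [] (fun v => v ++ [p.2])) PySem.Dict.empty with hD
  have hkeys : D.keys = PySem.List.dedup (all_nodes.map gtKey) := by
    rw [hD, PySem.Dict.keys_foldl_modify_key l (fun p => p.1) [] (fun _ p => fun v => v ++ [p.2])]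
    simp only [PySem.Dict.keys_empty, hl, List.map_map]
    rfl
  have hnodup : D.keys.Nodup := by
    rw [hD]
    exact PySem.Dict.nodup_keys_foldl_modify_key l (fun p => p.1) [] _ _ PySem.Dict.nodup_keys_empty
  have hget : ∀ c : String, D.getD c [] = all_nodes.filter (fun n => gtKey n == c) := by
    intro c
    rw [hD, PySem.Dict.getD_foldl_modify_append l PySem.Dict.empty c]
    simp only [PySem.Dict.getD_empty, List.nil_append, hl, List.filter_map, List.map_map]
    simp [Function.comp_def]
  rw [items_eq_map_keys D hnodup [], hkeys]
  apply List.map_congr_left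
  intro L _
  rw [hget L]
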